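-- pv_equiv track=rewrite | github.com/pypi-data/pypi-mirror-381 | packages/mwe-query/mwe_query-0.2.0a2.tar.gz/mwe_query-0.2.0a2/mwe_query/mwe_annotate.py | expandlemmas
-- ===== SOURCE A (Python) =====
-- from typing import cast, Any, List, Optional, Tuple
--
-- altsym = "|"
--
-- def expandlemmas(lemmas: List[str]) -> List[List[str]]:
--     results = []
--     if lemmas == []:
--         return [[]]
--     head = lemmas[0]
--     tail = lemmas[1:]
--     altheads = head.split(altsym)
--     tailresults = expandlemmas(tail)
--     for althead in altheads:
--         for tailresult in tailresults:
--             result = [althead] + tailresult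
--             results.append(result)
--     return results
-- ===== SOURCE B (Python) =====
-- altsym = "|"
--
-- def expandlemmas(lemmas):
--     # Iterative accumulator: grow partial lemma-sequences left-to-right.
--     results = [[]]
--     for lemma in lemmas:
--         alternatives = lemma.split(altsym)
--         results = [prefix + [alt] for prefix in results for alt in alternatives]
--     return results
-- ===== Notes on version B (the rewrite author's own statement) =====
-- stated objective: alternative
-- what changed: Replaced A's recursion on the tail (with nested appending loops) by an iterative left-to-right accumulator of partial lemma-sequences, rebuilt per lemma via a flat comprehension.
import Mathlib
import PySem

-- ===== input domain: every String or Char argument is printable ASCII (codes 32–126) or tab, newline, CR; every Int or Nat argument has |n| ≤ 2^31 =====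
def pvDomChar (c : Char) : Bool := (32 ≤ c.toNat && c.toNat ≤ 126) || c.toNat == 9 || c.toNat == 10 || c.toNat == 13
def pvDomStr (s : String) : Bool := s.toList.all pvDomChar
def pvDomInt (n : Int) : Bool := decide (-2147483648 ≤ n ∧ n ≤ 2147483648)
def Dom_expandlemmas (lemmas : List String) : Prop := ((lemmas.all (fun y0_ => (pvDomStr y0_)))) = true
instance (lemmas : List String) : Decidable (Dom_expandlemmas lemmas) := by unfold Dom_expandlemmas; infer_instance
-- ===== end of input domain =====

-- B replaces A's recursion over the tail by an iterative left-to-right accumulator of partial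
-- lemma-sequences (objective: alternative decomposition, same cost and identical output order).

-- shared primitive: s.split("|") — exact, since the separator is the nonempty literal "|"
-- (PySem.Str.split? returns none only for an empty separator).
def splitAlt (s : String) : List String := (PySem.Str.split? s "|").getD []

-- ===== PORT A =====
-- Literal port of A: recursion on the list; the nested for-loops over altheads/tailresults
-- appending `[althead] ++ tailresult` become nested foldls over the same accumulator.
def expandlemmas (lemmas : List String) : List (List String) :=
  match lemmas with
  | [] => [[]]
  | head :: tail =>
      let altheads := splitAlt head
      let tailresults := expandlemmas tail
      altheads.foldl (fun results althead =>
        tailresults.foldl (fun results tailresult =>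
          results ++ [[althead] ++ tailresult]) results) []

-- ===== PORT B =====
-- Literal port of B: foldl over the lemmas; the comprehension
-- [prefix + [alt] for prefix in results for alt in alternatives] is flatMap/map.
def expandlemmas_alt (lemmas : List String) : List (List String) :=
  lemmas.foldl (fun results lemma_ =>
    results.flatMap (fun prefix_ =>
      (splitAlt lemma_).map (fun alt => prefix_ ++ [alt]))) [[]]

-- ===== PRECONDITION & SPEC =====
def Spec_expandlemmas (lemmas : List String) (out : List (List String)) : Prop := out = expandlemmas_alt lemmas
instance (lemmas : List String) (out : List (List String)) : Decidable (Spec_expandlemmas lemmas out) := by unfold Spec_expandlemmas; infer_instance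

-- ===== CLAIM (what is proved, stated in full; the proofs are below) =====
def Claim_equal_expandlemmas : Prop := ∀ (lemmas : List String), Dom_expandlemmas lemmas → Spec_expandlemmas lemmas (expandlemmas lemmas)

-- ===== LEMMAS AND PROOFS =====

-- A's cons step, with the two accumulator loops rewritten to flatMap/map shape.
theorem expandlemmas_cons (head : String) (tail : List String) :
    expandlemmas (head :: tail) =
      (splitAlt head).flatMap (fun a =>
        (expandlemmas tail).map (fun tr => [a] ++ tr)) := by
  simp [expandlemmas, ← List.flatMap_def, ← List.map_eq_flatMap]

-- Invariant of B's loop: folding the remaining lemmas extends every partial result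
-- by every full expansion of those lemmas (A's value), in the same order.
theorem alt_invariant (l : List String) :
    ∀ (acc : List (List String)),
      l.foldl (fun results lemma_ =>
          results.flatMap (fun prefix_ =>
            (splitAlt lemma_).map (fun alt => prefix_ ++ [alt]))) acc
        = acc.flatMap (fun p => (expandlemmas l).map (fun s => p ++ s)) := by
  induction l with
  | nil => intro acc; simp [expandlemmas]
  | cons h t ih =>
      intro acc
      simp only [List.foldl_cons, ih, expandlemmas_cons]
      simp [List.flatMap_assoc, List.flatMap_map, List.map_flatMap, Function.comp_def, List.append_assoc]

-- ===== VERDICT (by name: the statement is the Claim_ definition above) =====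
theorem expandlemmas_spec : Claim_equal_expandlemmas := by
  intro lemmas _
  unfold Spec_expandlemmas expandlemmas_alt
  rw [alt_invariant]
  simp
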